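-- pv_equiv track=rewrite | github.com/hjsuh18/CourseComb_clone | courses/time_compare.py | day_convert
-- ===== SOURCE A (Python) =====
-- def day_convert(day):
--     day_array = [0, 0, 0, 0, 0]
--     for i in range(0, len(day)):
--         d = day[i]
--         if d == 'M':
--             day_array[0] = 1
--         if d == 'T':
--             if i + 1 < len(day) and day[i + 1] == 'h':
--                 day_array[3] = 1
--                 i += 1
--             else:
--                 day_array[1] = 1
--         if d == 'W':
--             day_array[2] = 1
--         if d == 'F':
--             day_array[4] = 1
--     return day_array
-- ===== SOURCE B (Python) =====
-- def day_convert(day):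
--     # Tokenize the string greedily ('Th' first, else one character), collect
--     # the tokens in a set, then read the five weekday flags off by membership.
--     tokens = set()
--     rest = day
--     while rest:
--         if rest.startswith('Th'):
--             tokens.add('Th')
--             rest = rest[2:]
--         else:
--             tokens.add(rest[0])
--             rest = rest[1:]
--     return [int(d in tokens) for d in ('M', 'T', 'W', 'Th', 'F')]
-- ===== Notes on version B (the rewrite author's own statement) =====
-- stated objective: simpler
-- what changed: A walks indices over the string with a lookahead and an ineffective loop-variable increment, mutating a 5-cell array; B greedily tokenizes the string ('Th' first, else one character) into a set and reads the five flags off by membership.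
import Mathlib
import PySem

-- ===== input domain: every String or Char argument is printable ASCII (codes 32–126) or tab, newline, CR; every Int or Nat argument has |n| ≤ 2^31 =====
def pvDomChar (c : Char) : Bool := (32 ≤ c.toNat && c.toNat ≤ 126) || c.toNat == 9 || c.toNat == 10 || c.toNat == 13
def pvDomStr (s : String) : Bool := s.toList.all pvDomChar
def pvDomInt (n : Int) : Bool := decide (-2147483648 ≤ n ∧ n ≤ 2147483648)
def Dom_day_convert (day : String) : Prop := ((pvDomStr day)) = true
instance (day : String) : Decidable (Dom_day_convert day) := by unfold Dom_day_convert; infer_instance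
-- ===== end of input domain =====

-- B replaces A's index loop (with its lookahead and ineffective loop-variable
-- increment) by a greedy
-- tokenizer ('Th' first, else one char) into a set, then reads the five flags
-- off by membership; objective: simpler (not faster).

-- ===== PORT A =====
-- one iteration of A's for-loop body (i is the loop index)
def stepA (day : String) (acc : List Int) (i : Int) : List Int :=
  match PySem.Str.pyGet? day i with
  | none => acc       -- unreachable: range(0, len(day)) keeps i in range
  | some d =>
    let acc := if d == 'M' then acc.set 0 1 else acc
    let acc :=
      if d == 'T' then
        if (decide (i + 1 < PySem.Str.len day) && (PySem.Str.pyGet? day (i + 1) == some 'h')) then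
          -- A increments the loop variable here, but the for-loop overwrites it
          -- on the next iteration: the statement has no effect and is dropped.
          acc.set 3 1
        else acc.set 1 1
      else acc
    let acc := if d == 'W' then acc.set 2 1 else acc
    if d == 'F' then acc.set 4 1 else acc

def day_convert (day : String) : List Int :=
  (PySem.List.pyRange 0 (PySem.Str.len day)).foldl (stepA day) [0, 0, 0, 0, 0]

-- ===== PORT B =====
-- B's while-loop: greedily take 'Th', else one character; collect tokens in a set.
-- (rest[2:] / rest[1:] on nonnegative in-range bounds are List.drop; rest[0] is the head char.)
def toksGo (tokens : PySem.Set (List Char)) (rest : List Char) : PySem.Set (List Char) :=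
  match rest with
  | [] => tokens
  | c :: r =>
    if PySem.Chars.startswith (c :: r) ['T', 'h'] then
      toksGo (PySem.Set.add tokens ['T', 'h']) ((c :: r).drop 2)
    else
      toksGo (PySem.Set.add tokens [c]) r
termination_by rest.length
decreasing_by all_goals (simp; try omega)

def day_convert_alt (day : String) : List Int :=
  let tokens := toksGo PySem.Set.empty day.toList
  [['M'], ['T'], ['W'], ['T', 'h'], ['F']].map
    (fun d => if PySem.Set.contains tokens d then (1 : Int) else 0)

-- ===== PRECONDITION & SPEC =====
def Spec_day_convert (day : String) (out : List Int) : Prop := out = day_convert_alt day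
instance (day : String) (out : List Int) : Decidable (Spec_day_convert day out) := by unfold Spec_day_convert; infer_instance

-- ===== CLAIM (what is proved, stated in full; the proofs are below) =====
def Claim_equal_day_convert : Prop := ∀ (day : String), Dom_day_convert day → Spec_day_convert day (day_convert day)

-- ===== LEMMAS AND PROOFS =====

-- shared characterisations: a 'T' not followed by 'h', and an adjacent pair 'Th'
def stT : List Char → Bool
  | [] => false
  | c :: r => (c == 'T' && r.head? != some 'h') || stT r

def pairTh : List Char → Bool
  | [] => false
  | c :: r => (c == 'T' && r.head? == some 'h') || pairTh r

-- join: a flag cell that the loop may overwrite with 1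
def jn (x : Int) (b : Bool) : Int := if b then 1 else x

theorem jn_jn (x : Int) (c b : Bool) :
    jn (jn x c) b = jn x (c || b) := by
  cases c <;> cases b <;> simp [jn]

set_option maxHeartbeats 1000000 in
theorem stepA_eq (day : String) (i : Int) (d : Char) (b : Bool) (m t w th f : Int)
    (hget : PySem.Str.pyGet? day i = some d)
    (hc : (decide (i + 1 < PySem.Str.len day) && (PySem.Str.pyGet? day (i + 1) == some 'h')) = b) :
    stepA day [m, t, w, th, f] i
      = [jn m (d == 'M'), jn t (d == 'T' && !b), jn w (d == 'W'),
         jn th (d == 'T' && b), jn f (d == 'F')] := by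
  unfold stepA
  rw [hget, hc]
  cases b <;> cases hM : d == 'M' <;> cases hT : d == 'T' <;>
    cases hW : d == 'W' <;> cases hF : d == 'F' <;> simp_all [jn, List.set]

-- A's fold over range(k, len(day)) computes the flags of day[k:]
theorem foldA (day : String) (fuel : Nat) : ∀ (k : Nat) (m t w th f : Int),
    day.toList.length ≤ k + fuel →
    (PySem.List.pyRange (k : Int) (PySem.Str.len day)).foldl (stepA day) [m, t, w, th, f]
      = [jn m ((day.toList.drop k).contains 'M'),
         jn t (stT (day.toList.drop k)),
         jn w ((day.toList.drop k).contains 'W'),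
         jn th (pairTh (day.toList.drop k)),
         jn f ((day.toList.drop k).contains 'F')] := by
  induction fuel with
  | zero =>
    intro k m t w th f hk
    rw [Nat.add_zero] at hk
    rw [PySem.List.pyRange_one_eq_nil (by rw [PySem.Str.len_eq]; exact_mod_cast hk),
        List.drop_eq_nil_of_le hk]
    simp [jn, stT, pairTh]
  | succ fuel ih =>
    intro k m t w th f hk
    by_cases hlt : k < day.toList.length
    · rw [PySem.List.pyRange_one_cons (by rw [PySem.Str.len_eq]; exact_mod_cast hlt)]
      rw [List.drop_eq_getElem_cons hlt]
      have hget : PySem.Str.pyGet? day (k : Int) = some (day.toList[k]) := by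
        rw [PySem.Str.pyGet?_natCast, List.getElem?_eq_getElem hlt]
      have hget1 : PySem.Str.pyGet? day ((k : Int) + 1) = day.toList[k + 1]? := by
        rw [show ((k : Int) + 1) = ((k + 1 : Nat) : Int) by push_cast; ring,
            PySem.Str.pyGet?_natCast]
      have hcond : (decide ((k : Int) + 1 < PySem.Str.len day)
            && (PySem.Str.pyGet? day ((k : Int) + 1) == some 'h'))
          = ((day.toList.drop (k + 1)).head? == some 'h') := by
        have hlen2 : day.toList.length = day.length := by simp
        rw [hget1, List.head?_drop, PySem.Str.len_eq]
        rcases Nat.lt_or_ge (k + 1) day.toList.length with h1 | h1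
        · simp only [List.getElem?_eq_getElem h1]
          have hlen : ((k : Int) + 1 < (day.length : Int)) := by
            rw [← hlen2]; exact_mod_cast h1
          simp [hlen]
        · simp only [List.getElem?_eq_none h1]
          have hlen : ¬ ((k : Int) + 1 < (day.length : Int)) := by
            rw [← hlen2]; exact_mod_cast Nat.not_lt.mpr h1
          simp [hlen]
      rw [List.foldl_cons,
          stepA_eq day (k : Int) (day.toList[k]) _ m t w th f hget hcond]
      rw [show ((k : Int) + 1) = ((k + 1 : Nat) : Int) by push_cast; ring]
      rw [ih (k + 1) _ _ _ _ _ (by omega)]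
      simp only [jn_jn, List.contains_cons, stT, pairTh, List.head?_drop, bne]
      simp [Bool.beq_comm]
    · rw [PySem.List.pyRange_one_eq_nil
            (by rw [PySem.Str.len_eq]; exact_mod_cast Nat.le_of_not_lt hlt),
          List.drop_eq_nil_of_le (Nat.le_of_not_lt hlt)]
      simp [jn, stT, pairTh]

-- the guard of B's tokenizer, as a condition on the first characters
theorem startswith_Th_iff (c : Char) (r : List Char) :
    PySem.Chars.startswith (c :: r) ['T', 'h'] = true ↔ c = 'T' ∧ r.head? = some 'h' := by
  rw [PySem.Chars.startswith_iff]
  constructor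
  · rintro ⟨u, hu⟩
    obtain ⟨rfl, rfl⟩ : c = 'T' ∧ r = 'h' :: u := by
      simpa using hu.symm
    simp
  · rintro ⟨rfl, hh⟩
    obtain ⟨u, rfl⟩ : ∃ u, r = 'h' :: u := by
      cases r with
      | nil => simp at hh
      | cons a u => exact ⟨u, by simpa using congrArg (fun o => o.getD 'h' :: u) hh⟩
    exact ⟨u, rfl⟩

-- B's tokenizer membership, for a single character other than 'T' and 'h'
theorem toksGo_mem_single (c : Char) (hT : c ≠ 'T') (hh : c ≠ 'h')
    (s : PySem.Set (List Char)) (cs : List Char) :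
    ([c] ∈ toksGo s cs ↔ [c] ∈ s ∨ c ∈ cs) := by
  fun_induction toksGo s cs with
  | case1 tokens => simp
  | case2 tokens c' r hsw ih =>
    obtain ⟨rfl, u, rfl⟩ : c' = 'T' ∧ ∃ u, r = 'h' :: u := by
      obtain ⟨h1, h2⟩ := (startswith_Th_iff c' r).mp hsw
      cases r with
      | nil => simp at h2
      | cons a u => exact ⟨h1, u, by simp_all⟩
    simp only [List.drop_succ_cons, List.drop_zero] at ih ⊢
    rw [ih, PySem.Set.mem_add]
    simp [hT, hh, List.cons.injEq]
    try tauto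
  | case3 tokens c' r hsw ih =>
    rw [ih, PySem.Set.mem_add]
    simp only [List.mem_cons, List.cons.injEq, and_true]
    tauto

-- B's tokenizer membership for the token 'T'
theorem toksGo_mem_T (s : PySem.Set (List Char)) (cs : List Char) :
    (['T'] ∈ toksGo s cs ↔ ['T'] ∈ s ∨ stT cs = true) := by
  fun_induction toksGo s cs with
  | case1 tokens => simp [stT]
  | case2 tokens c' r hsw ih =>
    obtain ⟨rfl, u, rfl⟩ : c' = 'T' ∧ ∃ u, r = 'h' :: u := by
      obtain ⟨h1, h2⟩ := (startswith_Th_iff c' r).mp hsw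
      cases r with
      | nil => simp at h2
      | cons a u => exact ⟨h1, u, by simp_all⟩
    simp only [List.drop_succ_cons, List.drop_zero] at ih ⊢
    rw [ih, PySem.Set.mem_add]
    simp only [stT, List.head?_cons]
    simp
    try tauto
  | case3 tokens c' r hsw ih =>
    have hkey : ¬ (c' = 'T' ∧ r.head? = some 'h') := fun h =>
      hsw ((startswith_Th_iff c' r).mpr h)
    rw [ih, PySem.Set.mem_add]
    simp only [stT]
    by_cases hc : c' = 'T'
    · subst hc
      have hne : r.head? ≠ some 'h' := fun h => hkey ⟨rfl, h⟩
      simp [hne]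
      try tauto
    · simp [hc, Ne.symm hc]
      try tauto

-- B's tokenizer membership for the token 'Th'
theorem toksGo_mem_Th (s : PySem.Set (List Char)) (cs : List Char) :
    (['T', 'h'] ∈ toksGo s cs ↔ ['T', 'h'] ∈ s ∨ pairTh cs = true) := by
  fun_induction toksGo s cs with
  | case1 tokens => simp [pairTh]
  | case2 tokens c' r hsw ih =>
    obtain ⟨rfl, u, rfl⟩ : c' = 'T' ∧ ∃ u, r = 'h' :: u := by
      obtain ⟨h1, h2⟩ := (startswith_Th_iff c' r).mp hsw
      cases r with
      | nil => simp at h2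
      | cons a u => exact ⟨h1, u, by simp_all⟩
    simp only [List.drop_succ_cons, List.drop_zero] at ih ⊢
    rw [ih, PySem.Set.mem_add]
    simp [pairTh]
    try tauto
  | case3 tokens c' r hsw ih =>
    have hkey : ¬ (c' = 'T' ∧ r.head? = some 'h') := fun h =>
      hsw ((startswith_Th_iff c' r).mpr h)
    rw [ih, PySem.Set.mem_add]
    simp only [pairTh]
    have hfirst : (c' == 'T' && (r.head? == some 'h')) = false := by
      by_cases h1 : c' = 'T' <;> by_cases h2 : r.head? = some 'h' <;>
        simp_all
    rw [hfirst]
    have hne : ¬ (['T', 'h'] = [c']) := by simp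
    simp [hne]
    try tauto

-- one output flag of B equals one flag of A's characterisation
theorem flag_eq (L : List Char) (tok : List Char) (b : Bool)
    (h : tok ∈ toksGo PySem.Set.empty L ↔ b = true) :
    (if PySem.Set.contains (toksGo PySem.Set.empty L) tok then (1 : Int) else 0) = jn 0 b := by
  have hc : PySem.Set.contains (toksGo PySem.Set.empty L) tok
      = decide (tok ∈ toksGo PySem.Set.empty L) := by
    simp [PySem.Set.contains]
  rw [hc]
  cases b with
  | true =>
    simp only [jn, decide_eq_true (h.mpr rfl), if_true]
  | false =>
    have hnm : tok ∉ toksGo PySem.Set.empty L := fun hm => absurd (h.mp hm) (by simp)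
    simp only [jn, decide_eq_false hnm, Bool.false_eq_true, if_false]

-- ===== VERDICT (by name: the statement is the Claim_ definition above) =====
theorem day_convert_spec : Claim_equal_day_convert := by
  intro day _
  show day_convert day = day_convert_alt day
  unfold day_convert day_convert_alt
  have h0 : PySem.List.pyRange 0 (PySem.Str.len day)
      = PySem.List.pyRange (((0 : Nat) : Int)) (PySem.Str.len day) := by norm_num
  rw [h0, foldA day day.toList.length 0 0 0 0 0 0 (by omega)]
  simp only [List.drop_zero, List.map_cons, List.map_nil]
  rw [flag_eq day.toList ['M'] (day.toList.contains 'M') (by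
        rw [toksGo_mem_single 'M' (by decide) (by decide)]
        simp [PySem.Set.empty]),
      flag_eq day.toList ['T'] (stT day.toList) (by
        rw [toksGo_mem_T]
        simp [PySem.Set.empty]),
      flag_eq day.toList ['W'] (day.toList.contains 'W') (by
        rw [toksGo_mem_single 'W' (by decide) (by decide)]
        simp [PySem.Set.empty]),
      flag_eq day.toList ['T', 'h'] (pairTh day.toList) (by
        rw [toksGo_mem_Th]
        simp [PySem.Set.empty]),
      flag_eq day.toList ['F'] (day.toList.contains 'F') (by
        rw [toksGo_mem_single 'F' (by decide) (by decide)]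
        simp [PySem.Set.empty])]
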